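-- pv_equiv track=rewrite | github.com/KhoaTruong0108/AutoRole | src/autorole/integrations/form_controls/executor.py | _pick_top_option
-- ===== SOURCE A (Python) =====
-- def _pick_top_option(suggestion: str, options: list[str]) -> str | None:
-- 	if not options:
-- 		return None
-- 	needle = suggestion.strip().lower()
-- 	if not needle:
-- 		return options[0]
--
-- 	for option in options:
-- 		opt = option.lower()
-- 		if needle == opt:
-- 			return option
--
-- 	for option in options:
-- 		opt = option.lower()
-- 		if needle in opt or opt in needle:
-- 			return option
--
-- 	return options[0]
-- ===== SOURCE B (Python) =====
-- def _pick_top_option(suggestion: str, options: list[str]) -> str | None: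
-- 	if not options:
-- 		return None
-- 	needle = suggestion.strip().lower()
-- 	if not needle:
-- 		return options[0]
-- 	first_substring = None
-- 	for option in options:
-- 		opt = option.lower()
-- 		if needle == opt:
-- 			return option
-- 		if first_substring is None and (needle in opt or opt in needle):
-- 			first_substring = option
-- 	return first_substring if first_substring is not None else options[0]
-- ===== Notes on version B (the rewrite author's own statement) =====
-- stated objective: simpler
-- what changed: Replaces A's two sequential scans (exact match, then substring match) by one single pass that returns immediately on an exact match and stashes the first substring match in an accumulator, so the list is traversed once.
import Mathlib
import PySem

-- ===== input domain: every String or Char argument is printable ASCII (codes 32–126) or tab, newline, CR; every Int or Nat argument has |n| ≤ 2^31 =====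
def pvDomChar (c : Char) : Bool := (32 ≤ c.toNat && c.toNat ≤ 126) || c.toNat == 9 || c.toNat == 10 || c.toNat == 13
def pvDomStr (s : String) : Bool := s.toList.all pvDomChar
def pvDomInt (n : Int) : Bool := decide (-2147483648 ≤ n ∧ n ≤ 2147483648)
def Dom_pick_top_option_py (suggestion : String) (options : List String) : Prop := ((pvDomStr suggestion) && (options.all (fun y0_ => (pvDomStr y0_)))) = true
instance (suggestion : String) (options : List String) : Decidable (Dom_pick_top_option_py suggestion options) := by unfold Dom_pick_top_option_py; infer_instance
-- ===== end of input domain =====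

-- B merges A's two sequential scans into one pass that stashes the first substring match; same return value, stated objective: simpler.
-- ===== PORT A =====
-- first loop of A: first option whose lowercase equals needle
def pickA_exact (needle : String) : List String → Option String
  | [] => none
  | o :: rest => if needle == PySem.Str.lower o then some o else pickA_exact needle rest

-- second loop of A: first option with a substring relation to needle
def pickA_sub (needle : String) : List String → Option String
  | [] => none
  | o :: rest =>
    if PySem.Str.isIn needle (PySem.Str.lower o) || PySem.Str.isIn (PySem.Str.lower o) needle
    then some o else pickA_sub needle rest

def pick_top_option_py (suggestion : String) (options : List String) : Option String :=
  match options with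
  | [] => none
  | o0 :: _ =>
    let needle := PySem.Str.lower (PySem.Str.strip suggestion)
    if needle == "" then some o0
    else
      match pickA_exact needle options with
      | some o => some o
      | none =>
        match pickA_sub needle options with
        | some o => some o
        | none => some o0

-- ===== PORT B =====
-- B's single loop: early-return an exact match, stash the first substring match in first_sub
def pickB_loop (needle : String) : List String → Option String → Option String
  | [], first_sub => first_sub
  | o :: rest, first_sub =>
    let opt := PySem.Str.lower o
    if needle == opt then some o
    else if first_sub.isNone && (PySem.Str.isIn needle opt || PySem.Str.isIn opt needle)
    then pickB_loop needle rest (some o)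
    else pickB_loop needle rest first_sub

def pick_top_option_py_alt (suggestion : String) (options : List String) : Option String :=
  match options with
  | [] => none
  | o0 :: _ =>
    let needle := PySem.Str.lower (PySem.Str.strip suggestion)
    if needle == "" then some o0
    else
      match pickB_loop needle options none with
      | some r => some r
      | none => some o0

-- ===== PRECONDITION & SPEC =====
def Spec_pick_top_option_py (suggestion : String) (options : List String) (out : Option String) : Prop := out = pick_top_option_py_alt suggestion options
instance (suggestion : String) (options : List String) (out : Option String) : Decidable (Spec_pick_top_option_py suggestion options out) := by unfold Spec_pick_top_option_py; infer_instance

-- ===== CLAIM (what is proved, stated in full; the proofs are below) =====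
def Claim_equal_pick_top_option_py : Prop := ∀ (suggestion : String) (options : List String), Dom_pick_top_option_py suggestion options → Spec_pick_top_option_py suggestion options (pick_top_option_py suggestion options)

-- ===== LEMMAS AND PROOFS =====

-- ===== VERDICT (by name: the statement is the Claim_ definition above) =====
-- loop invariant: B's single pass equals A's exact scan, falling back to the stash or A's substring scan
theorem pickB_loop_eq (needle : String) (opts : List String) (acc : Option String) :
    pickB_loop needle opts acc =
      match pickA_exact needle opts with
      | some o => some o
      | none => match acc with
        | some x => some x
        | none => pickA_sub needle opts := by
  induction opts generalizing acc with
  | nil => cases acc <;> rfl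
  | cons o rest ih =>
    simp only [pickB_loop, pickA_exact, pickA_sub]
    by_cases he : needle == PySem.Str.lower o
    · simp [he]
    · simp only [he, if_false, Bool.false_eq_true]
      cases acc with
      | some x =>
        simp only [Option.isNone_some, Bool.false_and, if_false, Bool.false_eq_true, ih]
      | none =>
        simp only [Option.isNone_none, Bool.true_and]
        cases hs : (PySem.Str.isIn needle (PySem.Str.lower o)
            || PySem.Str.isIn (PySem.Str.lower o) needle) <;>
          simp only [hs, if_true, if_false, Bool.false_eq_true, ih] <;>
          cases pickA_exact needle rest <;> rfl


theorem pick_cons_eq (needle o0 : String) (rest : List String) :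
    (if needle == "" then some o0
     else
       match pickA_exact needle (o0 :: rest) with
       | some o => some o
       | none =>
         match pickA_sub needle (o0 :: rest) with
         | some o => some o
         | none => some o0) =
    (if needle == "" then some o0
     else
       match pickB_loop needle (o0 :: rest) none with
       | some r => some r
       | none => some o0) := by
  rw [pickB_loop_eq]
  by_cases h0 : needle == "" <;>
    simp only [h0, if_true, if_false, Bool.false_eq_true] <;>
    cases pickA_exact needle (o0 :: rest) <;>
    cases pickA_sub needle (o0 :: rest) <;> rfl

theorem pick_top_option_py_spec : Claim_equal_pick_top_option_py := by
  intro suggestion options _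
  unfold Spec_pick_top_option_py pick_top_option_py pick_top_option_py_alt
  cases options with
  | nil => rfl
  | cons o0 rest =>
    exact pick_cons_eq (PySem.Str.lower (PySem.Str.strip suggestion)) o0 rest
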